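-- pv_equiv track=rewrite | github.com/Panvitej/Novel-Sorting-algorithm | src/hybrid_ads_boolean.py | hybrid_ads_boolean
-- ===== SOURCE A (Python) =====
-- from typing import List, Dict
--
-- def hybrid_ads_boolean(arr: List[int], Pmax: int, Pmin: int) -> Dict[str, int]:
--     """
--     Hybrid Adaptive Distinct Set (ADS) Boolean Selection.
--
--     Computes:
--         - Median
--         - p-th maximum
--         - p-th minimum
--
--     using threshold decomposition restricted to distinct values.
--     """
--
--     if not arr:
--         raise ValueError("Input array must not be empty.")
--
--     N = len(arr)
--     arr_sorted = sorted(arr)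
--     distinct_thresholds = sorted(set(arr_sorted))
--
--     results = {
--         "median": 0,
--         "pmax": 0,
--         "pmin": 0
--     }
--
--     prev_threshold = 0
--
--     for t in distinct_thresholds:
--         width = t - prev_threshold
--         prev_threshold = t
--
--         ones = sum(1 for x in arr_sorted if x >= t)
--         zeros = N - ones
--
--         # Median rule
--         if ones > zeros:
--             results["median"] += width
--
--         # p-th maximum rule
--         if ones >= Pmax:
--             results["pmax"] += width
--
--         # p-th minimum rule
--         if zeros < Pmin:
--             results["pmin"] += width
--
--     return results
-- ===== SOURCE B (Python) =====
-- from typing import List, Dict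
--
-- def hybrid_ads_boolean(arr: List[int], Pmax: int, Pmin: int) -> Dict[str, int]:
--     """One pass over the sorted array: at the first position i of each distinct
--     value t, the number of elements >= t is simply N - i, so no inner recount
--     (and no separate set + second sort) is needed."""
--     s = sorted(arr)
--     N = len(s)
--     median = pmax = pmin = 0
--     prev = 0
--     last = None
--     for i, t in enumerate(s):
--         if last == t:
--             continue
--         width = t - prev
--         ones = N - i          # elements >= t, since s is sorted
--         if ones > i:          # zeros == i
--             median += width
--         if ones >= Pmax:
--             pmax += width
--         if i < Pmin:          # zeros < Pmin
--             pmin += width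
--         prev = t
--         last = t
--     return {"median": median, "pmax": pmax, "pmin": pmin}
-- ===== Notes on version B (the rewrite author's own statement) =====
-- stated objective: faster
-- what changed: Instead of rebuilding a distinct-value set, sorting it, and re-scanning the whole array to count elements >= t for every distinct threshold, B sorts once and makes a single pass over the sorted array, skipping duplicate positions and reading the count of elements >= t directly as N - i at the first index i of each distinct value.
import Mathlib
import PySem

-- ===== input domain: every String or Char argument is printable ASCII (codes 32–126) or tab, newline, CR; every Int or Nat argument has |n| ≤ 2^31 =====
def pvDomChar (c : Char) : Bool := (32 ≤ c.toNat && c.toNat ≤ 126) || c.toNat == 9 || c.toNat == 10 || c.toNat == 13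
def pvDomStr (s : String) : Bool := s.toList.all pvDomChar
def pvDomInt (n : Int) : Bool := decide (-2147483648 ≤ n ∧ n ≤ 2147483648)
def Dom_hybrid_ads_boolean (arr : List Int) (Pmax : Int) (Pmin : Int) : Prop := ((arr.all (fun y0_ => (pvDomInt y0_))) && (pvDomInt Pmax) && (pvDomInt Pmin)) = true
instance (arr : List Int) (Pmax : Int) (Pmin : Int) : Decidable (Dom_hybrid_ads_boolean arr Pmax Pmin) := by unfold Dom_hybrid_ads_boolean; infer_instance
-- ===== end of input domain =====

-- ===== PORT A =====
-- B is one pass over the sorted array (count of elements >= t read off the index); proved equal to A's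
-- per-threshold recount. Pre_ excludes only the empty list, where Python A raises ValueError.

-- A-side helper: the generator expression `sum(1 for x in arr_sorted if x >= t)`
def pvCountGe (s : List Int) (t : Int) : Int :=
  ((s.filter (fun x => x ≥ t)).map (fun _ => (1 : Int))).sum

-- A-side helper: the body of A's `for t in distinct_thresholds` loop (state = (results, prev_threshold))
def pvAStep (arr_sorted : List Int) (N Pmax Pmin : Int)
    (st : PySem.Dict String Int × Int) (t : Int) : PySem.Dict String Int × Int :=
  let width := t - st.2
  let ones := pvCountGe arr_sorted t
  let zeros := N - ones
  let d := st.1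
  let d := if ones > zeros then d.modify "median" 0 (· + width) else d
  let d := if ones ≥ Pmax then d.modify "pmax" 0 (· + width) else d
  let d := if zeros < Pmin then d.modify "pmin" 0 (· + width) else d
  (d, t)

def hybrid_ads_boolean (arr : List Int) (Pmax : Int) (Pmin : Int) : List (String × Int) :=
  let N : Int := arr.length
  let arr_sorted := PySem.List.sorted arr id
  let distinct_thresholds := PySem.List.sorted (PySem.Set.ofList arr_sorted) id
  let results : PySem.Dict String Int := ⟨[("median", 0), ("pmax", 0), ("pmin", 0)]⟩
  (distinct_thresholds.foldl (pvAStep arr_sorted N Pmax Pmin) (results, 0)).1.items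

-- ===== PORT B =====
-- B-side helper: the body of B's `for i, t in enumerate(s)` loop
-- (state = (median, pmax, pmin, prev, last))
def pvBStep (N Pmax Pmin : Int) (st : Int × Int × Int × Int × Option Int)
    (it : Int × Int) : Int × Int × Int × Int × Option Int :=
  match st, it with
  | (median, pmax_, pmin_, prev, last), (i, t) =>
    if last == some t then (median, pmax_, pmin_, prev, last)
    else
      let width := t - prev
      let ones := N - i
      let median := if ones > i then median + width else median
      let pmax_ := if ones ≥ Pmax then pmax_ + width else pmax_
      let pmin_ := if i < Pmin then pmin_ + width else pmin_
      (median, pmax_, pmin_, t, some t)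

def hybrid_ads_boolean_alt (arr : List Int) (Pmax : Int) (Pmin : Int) : List (String × Int) :=
  let s := PySem.List.sorted arr id
  let N : Int := s.length
  let st := (PySem.List.enumerate s).foldl (pvBStep N Pmax Pmin) (0, 0, 0, 0, none)
  [("median", st.1), ("pmax", st.2.1), ("pmin", st.2.2.1)]

-- ===== PRECONDITION & SPEC =====
-- Pre_ excludes exactly the empty list, on which Python A raises ValueError.
def Pre_hybrid_ads_boolean (arr : List Int) (Pmax : Int) (Pmin : Int) : Prop := arr ≠ []
instance (arr : List Int) (Pmax : Int) (Pmin : Int) : Decidable (Pre_hybrid_ads_boolean arr Pmax Pmin) := by unfold Pre_hybrid_ads_boolean; infer_instance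
def pvWitness_hybrid_ads_boolean : List Int × Int × Int := ([3, 1, 3], 1, 2)

def Spec_hybrid_ads_boolean (arr : List Int) (Pmax : Int) (Pmin : Int) (out : List (String × Int)) : Prop := out = hybrid_ads_boolean_alt arr Pmax Pmin
instance (arr : List Int) (Pmax : Int) (Pmin : Int) (out : List (String × Int)) : Decidable (Spec_hybrid_ads_boolean arr Pmax Pmin out) := by unfold Spec_hybrid_ads_boolean; infer_instance

-- ===== CLAIM (what is proved, stated in full; the proofs are below) =====
def Claim_equal_hybrid_ads_boolean : Prop := ∀ (arr : List Int) (Pmax : Int) (Pmin : Int), Dom_hybrid_ads_boolean arr Pmax Pmin → Pre_hybrid_ads_boolean arr Pmax Pmin → Spec_hybrid_ads_boolean arr Pmax Pmin (hybrid_ads_boolean arr Pmax Pmin)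

-- ===== LEMMAS AND PROOFS =====

-- A's loop with the triple (median, pmax, pmin) in place of the dict (state = (m, p, q, prev))
def pvAStepT (s : List Int) (N Pmax Pmin : Int) (st : Int × Int × Int × Int) (t : Int) :
    Int × Int × Int × Int :=
  let width := t - st.2.2.2
  let ones := pvCountGe s t
  let zeros := N - ones
  (st.1 + (if ones > zeros then width else 0),
   st.2.1 + (if ones ≥ Pmax then width else 0),
   st.2.2.1 + (if zeros < Pmin then width else 0), t)

-- the three-key dict A carries
def pvD3 (m p q : Int) : PySem.Dict String Int := ⟨[("median", m), ("pmax", p), ("pmin", q)]⟩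

-- adjacent dedup of a sorted list, skipping a leading run equal to `last` — the thresholds B processes
def pvDedup : List Int → Option Int → List Int
  | [], _ => []
  | t :: r, last => if last == some t then pvDedup r last else t :: pvDedup r (some t)

theorem pvAStep_d3 (s : List Int) (N P1 P2 m p q prev t : Int) :
    pvAStep s N P1 P2 (pvD3 m p q, prev) t
      = (pvD3 (pvAStepT s N P1 P2 (m, p, q, prev) t).1
              (pvAStepT s N P1 P2 (m, p, q, prev) t).2.1
              (pvAStepT s N P1 P2 (m, p, q, prev) t).2.2.1,
         (pvAStepT s N P1 P2 (m, p, q, prev) t).2.2.2) := by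
  simp only [pvAStep, pvAStepT]
  split_ifs <;>
    simp [pvD3, PySem.Dict.modify, PySem.Dict.insert, PySem.Dict.getD, PySem.Dict.get?,
      PySem.Dict.contains]

theorem pvAFold_d3 (s : List Int) (N P1 P2 : Int) :
    ∀ (ts : List Int) (m p q prev : Int),
    List.foldl (pvAStep s N P1 P2) (pvD3 m p q, prev) ts
      = (pvD3 (List.foldl (pvAStepT s N P1 P2) (m, p, q, prev) ts).1
              (List.foldl (pvAStepT s N P1 P2) (m, p, q, prev) ts).2.1
              (List.foldl (pvAStepT s N P1 P2) (m, p, q, prev) ts).2.2.1,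
         (List.foldl (pvAStepT s N P1 P2) (m, p, q, prev) ts).2.2.2) := by
  intro ts
  induction ts with
  | nil => intro m p q prev; rfl
  | cons t r ih =>
      intro m p q prev
      simp only [List.foldl_cons, pvAStep_d3]
      exact ih _ _ _ _

theorem pvCountGe_eq (s : List Int) (t : Int) :
    pvCountGe s t = ((s.filter (fun x => decide (x ≥ t))).length : Int) := by
  simp [pvCountGe]

theorem pvDedup_mem : ∀ (l : List Int) (last : Option Int),
    l.Pairwise (· ≤ ·) → (∀ v, last = some v → ∀ x ∈ l, v ≤ x) →
    ∀ x, x ∈ pvDedup l last ↔ x ∈ l ∧ last ≠ some x := by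
  intro l
  induction l with
  | nil => intro last _ _ x; simp [pvDedup]
  | cons t r ih =>
      intro last hs hC x
      have hCr : ∀ v, (some t : Option Int) = some v → ∀ y ∈ r, v ≤ y := by
        intro v hv y hy; cases hv; exact List.rel_of_pairwise_cons hs hy
      by_cases h : last = some t
      · subst h
        rw [show pvDedup (t :: r) (some t) = pvDedup r (some t) by simp [pvDedup]]
        rw [ih (some t) hs.tail hCr x]
        simp only [List.mem_cons]
        constructor
        · rintro ⟨hx, hne⟩; exact ⟨Or.inr hx, hne⟩
        · rintro ⟨hx | hx, hne⟩
          · exact absurd (show (some t : Option Int) = some x by rw [hx]) hne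
          · exact ⟨hx, hne⟩
      · have hbeq : (last == some t) = false := by
          rcases last with _ | v
          · rfl
          · simpa using fun hc => h (by rw [hc])
        rw [show pvDedup (t :: r) last = t :: pvDedup r (some t) by
              simp [pvDedup, hbeq]]
        rw [List.mem_cons, ih (some t) hs.tail hCr x, List.mem_cons]
        constructor
        · rintro (rfl | ⟨hx, hne⟩)
          · exact ⟨Or.inl rfl, h⟩
          · refine ⟨Or.inr hx, ?_⟩
            rcases last with _ | v
            · simp
            · intro hc
              have hvx : v = x := by injection hc
              have hvt : v ≤ t := hC v rfl t List.mem_cons_self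
              have htx : t ≤ x := List.rel_of_pairwise_cons hs hx
              have htne : t ≠ x := fun hh => hne (by rw [hh])
              omega
        · rintro ⟨hx | hx, hne⟩
          · exact Or.inl hx
          · by_cases hxt : x = t
            · exact Or.inl hxt
            · refine Or.inr ⟨hx, fun hc => hxt ?_⟩
              injection hc with hh
              omega

theorem pvDedup_pairwise : ∀ (l : List Int) (last : Option Int),
    l.Pairwise (· ≤ ·) → (∀ v, last = some v → ∀ x ∈ l, v ≤ x) →
    (pvDedup l last).Pairwise (· < ·) := by
  intro l
  induction l with
  | nil => intro last _ _; simp [pvDedup]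
  | cons t r ih =>
      intro last hs hC
      have hCr : ∀ v, (some t : Option Int) = some v → ∀ y ∈ r, v ≤ y := by
        intro v hv y hy; cases hv; exact List.rel_of_pairwise_cons hs hy
      by_cases h : last = some t
      · subst h
        rw [show pvDedup (t :: r) (some t) = pvDedup r (some t) by simp [pvDedup]]
        exact ih (some t) hs.tail hCr
      · have hbeq : (last == some t) = false := by
          rcases last with _ | v
          · rfl
          · simpa using fun hc => h (by rw [hc])
        rw [show pvDedup (t :: r) last = t :: pvDedup r (some t) by
              simp [pvDedup, hbeq]]
        refine List.Pairwise.cons ?_ (ih (some t) hs.tail hCr)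
        intro y hy
        have hmem := (pvDedup_mem r (some t) hs.tail hCr y).mp hy
        have hty : t ≤ y := List.rel_of_pairwise_cons hs hmem.1
        have : t ≠ y := fun hc => hmem.2 (by rw [hc])
        omega

theorem pvMain (P1 P2 : Int) (s : List Int) (hs : s.Pairwise (· ≤ ·)) :
    ∀ (l pre : List Int) (m p q prev : Int) (last : Option Int),
    s = pre ++ l →
    (match last with
     | none => pre = []
     | some v => (∀ x ∈ pre, x ≤ v) ∧ v ∈ pre) →
    ∃ z, List.foldl (pvBStep (s.length : Int) P1 P2) (m, p, q, prev, last)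
          (PySem.List.enumerate l (pre.length : Int))
      = ((List.foldl (pvAStepT s (s.length : Int) P1 P2) (m, p, q, prev) (pvDedup l last)).1,
         (List.foldl (pvAStepT s (s.length : Int) P1 P2) (m, p, q, prev) (pvDedup l last)).2.1,
         (List.foldl (pvAStepT s (s.length : Int) P1 P2) (m, p, q, prev) (pvDedup l last)).2.2.1,
         (List.foldl (pvAStepT s (s.length : Int) P1 P2) (m, p, q, prev) (pvDedup l last)).2.2.2,
         z) := by
  intro l
  induction l with
  | nil =>
      intro pre m p q prev last hseq hlast
      exact ⟨last, rfl⟩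
  | cons t r ih =>
      intro pre m p q prev last hseq hlast
      have hsl : (pre ++ t :: r).Pairwise (· ≤ ·) := hseq ▸ hs
      have hsplit := List.pairwise_append.mp hsl
      rw [show PySem.List.enumerate (t :: r) (pre.length : Int)
            = ((pre.length : Int), t) :: PySem.List.enumerate r ((pre.length : Int) + 1) from rfl,
        List.foldl_cons]
      by_cases h : last = some t
      · -- duplicate of the previous distinct value: B skips it, A never saw it
        subst h
        rw [show pvBStep (s.length : Int) P1 P2 (m, p, q, prev, some t) ((pre.length : Int), t)
              = (m, p, q, prev, some t) by simp [pvBStep]]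
        rw [show pvDedup (t :: r) (some t) = pvDedup r (some t) by simp [pvDedup]]
        have hmem : t ∈ pre ++ [t] := by simp
        have hle : ∀ x ∈ pre ++ [t], x ≤ t := by
          intro x hx
          rcases List.mem_append.mp hx with hx | hx
          · exact hlast.1 x hx
          · simp at hx; omega
        have := ih (pre ++ [t]) m p q prev (some t)
          (by rw [hseq]; simp) ⟨hle, hmem⟩
        simpa using this
      · -- first position of a new distinct value t
        have hlt : ∀ x ∈ pre, x < t := by
          intro x hx
          rcases last with _ | v
          · rw [hlast] at hx; simp at hx
          · have hxv : x ≤ v := hlast.1 x hx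
            have hvt : v ≤ t := hsplit.2.2 v hlast.2 t List.mem_cons_self
            have hvne : v ≠ t := fun hc => h (by rw [hc])
            omega
        have hones : pvCountGe s t = ((r.length + 1 : Nat) : Int) := by
          rw [pvCountGe_eq, hseq, List.filter_append]
          rw [List.filter_eq_nil_iff.mpr (by
            intro x hx
            have := hlt x hx
            simp; omega)]
          rw [List.filter_eq_self.mpr (by
            intro x hx
            rcases List.mem_cons.mp hx with rfl | hx
            · simp
            · have := List.rel_of_pairwise_cons hsplit.2.1 hx
              simp; omega)]
          simp
        have hlen : (s.length : Int) = (pre.length : Int) + ((r.length + 1 : Nat) : Int) := by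
          rw [hseq]; push_cast [List.length_append, List.length_cons]; omega
        have hbeq : (last == some t) = false := by
          rcases last with _ | v
          · rfl
          · simpa using fun hc => h (by rw [hc])
        rw [show pvDedup (t :: r) last = t :: pvDedup r (some t) by
              simp [pvDedup, hbeq]]
        rw [List.foldl_cons]
        have hstep : pvBStep (s.length : Int) P1 P2 (m, p, q, prev, last) ((pre.length : Int), t)
            = ((pvAStepT s (s.length : Int) P1 P2 (m, p, q, prev) t).1,
               (pvAStepT s (s.length : Int) P1 P2 (m, p, q, prev) t).2.1,
               (pvAStepT s (s.length : Int) P1 P2 (m, p, q, prev) t).2.2.1,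
               t, some t) := by
          simp only [pvBStep, hbeq, pvAStepT, hones]
          simp only [Bool.false_eq_true, if_false, Prod.mk.injEq]
          refine ⟨?_, ?_, ?_, trivial⟩ <;> split_ifs <;> omega
        rw [hstep]
        have hmem : t ∈ pre ++ [t] := by simp
        have hle : ∀ x ∈ pre ++ [t], x ≤ t := by
          intro x hx
          rcases List.mem_append.mp hx with hx | hx
          · exact le_of_lt (hlt x hx)
          · simp at hx; omega
        have := ih (pre ++ [t]) (pvAStepT s (s.length : Int) P1 P2 (m, p, q, prev) t).1
          (pvAStepT s (s.length : Int) P1 P2 (m, p, q, prev) t).2.1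
          (pvAStepT s (s.length : Int) P1 P2 (m, p, q, prev) t).2.2.1
          (pvAStepT s (s.length : Int) P1 P2 (m, p, q, prev) t).2.2.2 (some t)
          (by rw [hseq]; simp) ⟨hle, hmem⟩
        simpa using this

-- ===== VERDICT (by name: the statement is the Claim_ definition above) =====
-- A's distinct-threshold list (sorted set of the sorted array) is exactly the adjacent dedup
theorem pvSortedSet (s : List Int) (hs : s.Pairwise (· ≤ ·)) :
    PySem.List.sorted (PySem.Set.ofList s) id = pvDedup s none := by
  have hCnone : ∀ v, (none : Option Int) = some v → ∀ x ∈ s, v ≤ x := fun v hv => nomatch hv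
  have hpw : (pvDedup s none).Pairwise (· < ·) := pvDedup_pairwise s none hs hCnone
  apply PySem.List.sorted_eq_of_perm_of_pairwise_lt
  · rw [List.perm_ext_iff_of_nodup (hpw.imp fun h => ne_of_lt h) (PySem.Set.nodup_ofList s)]
    intro a
    rw [pvDedup_mem s none hs hCnone a, PySem.Set.mem_ofList]
    simp
  · exact hpw

theorem hybrid_ads_boolean_spec : Claim_equal_hybrid_ads_boolean := by
  intro arr P1 P2 _ _
  unfold Spec_hybrid_ads_boolean hybrid_ads_boolean hybrid_ads_boolean_alt
  simp only
  have hpair : (PySem.List.sorted arr id).Pairwise (· ≤ ·) := PySem.List.sorted_pairwise arr id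
  have hlen : (PySem.List.sorted arr id).length = arr.length :=
    (PySem.List.sorted_perm arr id false).length_eq
  rw [pvSortedSet _ hpair, ← hlen]
  rw [show (⟨[("median", 0), ("pmax", 0), ("pmin", 0)]⟩ : PySem.Dict String Int)
        = pvD3 0 0 0 from rfl]
  rw [pvAFold_d3]
  obtain ⟨z, hz⟩ := pvMain P1 P2 (PySem.List.sorted arr id) hpair (PySem.List.sorted arr id)
    [] 0 0 0 0 none rfl rfl
  simp only [List.length_nil, Nat.cast_zero] at hz
  rw [show PySem.List.enumerate (PySem.List.sorted arr id)
        = PySem.List.enumerate (PySem.List.sorted arr id) (0 : Int) from rfl, hz]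
  rfl
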